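-- pv_equiv track=rewrite | github.com/Natali124/LinearCompartmentModels | Bfs.py | all_reach_outputs
-- ===== SOURCE A (Python) =====
-- import copy
--
-- def revert_graph (graph):
--     """takes set graph notation, reverts and returns list"""
--     n_of_vertices = len(graph)
--     result = [[] for i in range(n_of_vertices)]
--     for i in range(n_of_vertices):
--         for number in graph[i]:
--             result[number].append(i)
--     return result
--
-- def all_reach_outputs(graph, outputs):
--     """checks if at least one output is reachable from all points, outputs should be a list or a set"""
--     graph = revert_graph(graph)
--
--     queue = list(copy.deepcopy(outputs))
--     visited = [0] * len(graph)
--     for index in queue: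
--         visited[index] = 1
--     result = set()
--
--     while queue:
--         s = queue.pop()
--         result.add(s)
--         for neighbour in graph[s]:
--             if visited[neighbour] == 0:
--                 visited[neighbour] = 1
--                 queue.append(neighbour)
--
--     return len(result) == len(graph)
-- ===== SOURCE B (Python) =====
-- def all_reach_outputs(graph, outputs):
--     """checks if at least one output is reachable from all points, outputs should be a list or a set"""
--     n = len(graph)
--     reaches = [False] * n
--     for o in outputs:
--         reaches[o] = True
--     changed = True
--     while changed:
--         changed = False
--         for u in range(n):
--             if not reaches[u]:
--                 if any(reaches[v] for v in graph[u]):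
--                     reaches[u] = True
--                     changed = True
--     return all(reaches)
-- ===== Notes on version B (the rewrite author's own statement) =====
-- stated objective: alternative
-- what changed: Instead of building the reversed graph and running a stack-based search from the outputs while collecting popped labels in a set and comparing its size with len(graph), B never reverses the graph: it keeps one boolean array over the vertices and propagates reachability forward to a fixpoint (repeated full passes until nothing changes), then checks that every entry is true.
-- intended difference: On outputs lists that name one vertex by two different in-range labels (o and o-n, Python's negative-index wraparound), A counts the two labels as two distinct vertices in its final len(result)==len(graph) test and returns that miscount (e.g. False on ([[0]], [0,-1]) although every vertex reaches an output), while B returns whether every vertex really reaches some output (True there), the intended value. — e.g. on all_reach_outputs([[0]], [0, -1]): A returns false, B returns true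
import Mathlib
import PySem

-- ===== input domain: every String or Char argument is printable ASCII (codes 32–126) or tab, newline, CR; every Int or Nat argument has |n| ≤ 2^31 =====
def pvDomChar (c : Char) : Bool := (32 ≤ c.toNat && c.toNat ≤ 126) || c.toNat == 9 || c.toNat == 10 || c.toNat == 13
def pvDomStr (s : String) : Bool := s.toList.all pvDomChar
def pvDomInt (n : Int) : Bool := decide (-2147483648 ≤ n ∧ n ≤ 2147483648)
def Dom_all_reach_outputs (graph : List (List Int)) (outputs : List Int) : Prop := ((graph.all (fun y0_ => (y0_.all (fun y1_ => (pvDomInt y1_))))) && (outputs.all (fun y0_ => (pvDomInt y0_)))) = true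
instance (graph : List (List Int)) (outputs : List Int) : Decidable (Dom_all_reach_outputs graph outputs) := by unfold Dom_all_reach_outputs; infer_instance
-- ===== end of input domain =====

-- B replaces A's reverse-graph stack search and popped-label counting by a forward
-- boolean fixpoint over the given graph (alternative decomposition, not faster).

-- ===== PORT A =====
def revert_graph (graph : List (List Int)) : List (List Int) :=
  let result := (PySem.List.pyRange 0 (PySem.List.len graph) 1).map (fun _ => ([] : List Int))
  (PySem.List.pyRange 0 (PySem.List.len graph) 1).foldl (fun result i =>
    (PySem.List.pyGetD graph i []).foldl (fun result number =>
      PySem.List.pySetD result number (PySem.List.pyGetD result number [] ++ [i])) result) result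

def bfsLoopA (g : List (List Int)) : Nat → List Int → List Int → PySem.Set Int → PySem.Set Int
  | _, [], _, result => result
  | 0, _ :: _, _, result => result
  | fuel+1, q0 :: qs, visited, result =>
      let s := (q0 :: qs).getLast (List.cons_ne_nil q0 qs)
      let queue' := (q0 :: qs).dropLast
      let result' := PySem.Set.add result s
      let st := (PySem.List.pyGetD g s []).foldl
        (fun (qv : List Int × List Int) nb =>
          if PySem.List.pyGetD qv.2 nb 0 == 0 then
            (qv.1 ++ [nb], PySem.List.pySetD qv.2 nb 1)
          else qv) (queue', visited)
      bfsLoopA g fuel st.1 st.2 result'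

def all_reach_outputs (graph : List (List Int)) (outputs : List Int) : Bool :=
  let g := revert_graph graph
  let queue := outputs
  let visited := outputs.foldl (fun v index => PySem.List.pySetD v index 1)
    (List.replicate g.length (0 : Int))
  let result := bfsLoopA g (g.length + outputs.length + 1) queue visited PySem.Set.empty
  PySem.Set.len result == PySem.List.len g

-- ===== PORT B =====
def propagate_pass (graph : List (List Int)) (reaches : List Bool) : List Bool × Bool :=
  (List.range graph.length).foldl (fun (rc : List Bool × Bool) u =>
    if (!(rc.1.getD u false))
        && (graph.getD u []).any (fun v => PySem.List.pyGetD rc.1 v false)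
    then (rc.1.set u true, true)
    else rc) (reaches, false)

def fixLoopB (graph : List (List Int)) : Nat → List Bool → List Bool
  | 0, r => r
  | f+1, r =>
      let p := propagate_pass graph r
      if p.2 then fixLoopB graph f p.1 else p.1

def all_reach_outputs_alt (graph : List (List Int)) (outputs : List Int) : Bool :=
  let reaches := outputs.foldl (fun r o => PySem.List.pySetD r o true)
    (List.replicate graph.length false)
  (fixLoopB graph (graph.length + 1) reaches).all (fun b => b)

-- ===== PRECONDITION & SPEC =====
-- Pre_ excludes exactly the inputs on which A raises IndexError: some graph entry or
-- some output index outside [-len(graph), len(graph)).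
def Pre_all_reach_outputs (graph : List (List Int)) (outputs : List Int) : Prop :=
  (∀ adj ∈ graph, ∀ v ∈ adj, PySem.Raise.InRange graph.length v) ∧
  (∀ o ∈ outputs, PySem.Raise.InRange graph.length o)
instance (graph : List (List Int)) (outputs : List Int) : Decidable (Pre_all_reach_outputs graph outputs) := by
  unfold Pre_all_reach_outputs; infer_instance

def pvWitness_all_reach_outputs : List (List Int) × List Int := ([[1], [0]], [0])

-- On outputs lists naming one vertex by two different in-range labels (o and o-n, Python's
-- negative-index wraparound), A counts the two labels as two distinct vertices in its final
-- `len(result) == len(graph)` test and returns that miscount, while B returns whether every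
-- vertex really reaches an output — the intended value.
def D_all_reach_outputs (graph : List (List Int)) (outputs : List Int) : Prop :=
  ∃ o₁ ∈ outputs, ∃ o₂ ∈ outputs, o₁ ≠ o₂ ∧ o₁ % (graph.length : Int) = o₂ % (graph.length : Int)
instance (graph : List (List Int)) (outputs : List Int) : Decidable (D_all_reach_outputs graph outputs) := by
  unfold D_all_reach_outputs; infer_instance

def Spec_all_reach_outputs (graph : List (List Int)) (outputs : List Int) (out : Bool) : Prop :=
  ¬ D_all_reach_outputs graph outputs → out = all_reach_outputs_alt graph outputs
instance (graph : List (List Int)) (outputs : List Int) (out : Bool) : Decidable (Spec_all_reach_outputs graph outputs out) := by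
  unfold Spec_all_reach_outputs; infer_instance

def pvDiffWitness_all_reach_outputs : List (List Int) × List Int := ([[0]], [0, -1])
def pvDiffWitnessOut_all_reach_outputs : Bool × Bool := (false, true)

-- ===== CLAIM (what is proved, stated in full; the proofs are below) =====
def Claim_unchanged_all_reach_outputs : Prop := ∀ (graph : List (List Int)) (outputs : List Int), Dom_all_reach_outputs graph outputs → Pre_all_reach_outputs graph outputs → Spec_all_reach_outputs graph outputs (all_reach_outputs graph outputs)
def Claim_changed_all_reach_outputs : Prop := Dom_all_reach_outputs (pvDiffWitness_all_reach_outputs.1) (pvDiffWitness_all_reach_outputs.2) ∧ Pre_all_reach_outputs (pvDiffWitness_all_reach_outputs.1) (pvDiffWitness_all_reach_outputs.2) ∧ D_all_reach_outputs (pvDiffWitness_all_reach_outputs.1) (pvDiffWitness_all_reach_outputs.2) ∧ all_reach_outputs (pvDiffWitness_all_reach_outputs.1) (pvDiffWitness_all_reach_outputs.2) = pvDiffWitnessOut_all_reach_outputs.1 ∧ all_reach_outputs_alt (pvDiffWitness_all_reach_outputs.1) (pvDiffWitness_all_reach_outputs.2) = pvDiffWitnessOut_all_reach_outputs.2 ∧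 pvDiffWitnessOut_all_reach_outputs.1 ≠ pvDiffWitnessOut_all_reach_outputs.2

-- ===== LEMMAS AND PROOFS =====

-- The common mathematical content: vertex u (0 ≤ u < n) can reach some output.
-- `nu n i` is the vertex a Python index i ∈ [-n, n) names: (i % n).toNat.
def nu (n : Nat) (i : Int) : Nat := (i % (n : Int)).toNat

inductive ReachesOut (graph : List (List Int)) (outputs : List Int) : Nat → Prop
  | base (o : Int) (ho : o ∈ outputs) : ReachesOut graph outputs (nu graph.length o)
  | step (u : Nat) (x : Int) (hu : u < graph.length) (hx : x ∈ graph.getD u [])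
      (h : ReachesOut graph outputs (nu graph.length x)) : ReachesOut graph outputs u

theorem nu_lt {n : Nat} {i : Int} (h : PySem.Raise.InRange n i) : nu n i < n := by
  obtain ⟨h1, h2⟩ := h
  have hn : (n : Int) ≠ 0 := by omega
  have e1 := Int.emod_nonneg i hn
  have e2 := Int.emod_lt_of_pos i (show (0:Int) < n by omega)
  unfold nu; omega

theorem nu_natCast {n w : Nat} (h : w < n) : nu n (w : Int) = w := by
  have : (w : Int) % (n : Int) = w := Int.emod_eq_of_lt (by omega) (by omega)
  unfold nu; omega

theorem inRange_natCast {n w : Nat} (h : w < n) : PySem.Raise.InRange n (w : Int) :=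
  ⟨by omega, by omega⟩

theorem pyIdx_nu {n : Nat} {i : Int} (h : PySem.Raise.InRange n i) :
    PySem.List.pyIdx? n i = some (nu n i) := by
  obtain ⟨h1, h2⟩ := h
  unfold PySem.List.pyIdx? nu
  by_cases h0 : 0 ≤ i
  · rw [if_pos h0, if_pos h2]
    have : i % (n : Int) = i := Int.emod_eq_of_lt h0 h2
    congr 1; omega
  · rw [if_neg h0, if_pos h1]
    have e : i % (n : Int) = (i + n) % (n : Int) := by
      simp
    have : i % (n : Int) = i + n := by
      rw [e, Int.emod_eq_of_lt (by omega) (by omega)]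
    congr 1; omega

theorem pyGetD_nu {α : Type} (xs : List α) {i : Int} (d : α)
    (h : PySem.Raise.InRange xs.length i) :
    PySem.List.pyGetD xs i d = xs.getD (nu xs.length i) d := by
  unfold PySem.List.pyGetD PySem.List.pyGet?
  rw [pyIdx_nu h]
  simp [List.getD_eq_getElem?_getD]

theorem pySetD_nu {α : Type} (xs : List α) {i : Int} (v : α)
    (h : PySem.Raise.InRange xs.length i) :
    PySem.List.pySetD xs i v = xs.set (nu xs.length i) v := by
  unfold PySem.List.pySetD PySem.List.pySet?
  rw [pyIdx_nu h]
  rfl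

theorem count_set_add_one {α : Type} [BEq α] [LawfulBEq α] {l : List α} {u : Nat} {a b : α}
    (hu : u < l.length) (h : l[u] = a) (hne : (b == a) = false) :
    (l.set u b).count a + 1 = l.count a := by
  induction l generalizing u with
  | nil => simp at hu
  | cons x xs ih =>
    cases u with
    | zero =>
      simp at h; subst h
      simp [List.count_cons, hne]
    | succ k =>
      have hk : k < xs.length := by simpa using hu
      have h' : xs[k] = a := by simpa using h
      simp only [List.set_cons_succ, List.count_cons]
      have := ih hk h'
      omega

theorem getD_set_self' {α : Type} (l : List α) (u : Nat) (v d : α) (hu : u < l.length) :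
    (l.set u v).getD u d = v := by
  rw [List.getD_eq_getElem _ _ (by simpa using hu)]
  exact List.getElem_set_self (by simpa using hu)

theorem getD_set_ne' {α : Type} (l : List α) {u w : Nat} (v d : α) (h : w ≠ u) :
    (l.set u v).getD w d = l.getD w d := by
  by_cases hw : w < l.length
  · rw [List.getD_eq_getElem _ _ (by simpa using hw), List.getD_eq_getElem _ _ hw]
    exact List.getElem_set_ne (by omega) _
  · rw [List.getD_eq_getElem?_getD, List.getD_eq_getElem?_getD]
    rw [List.getElem?_eq_none (by simp; omega), List.getElem?_eq_none (by omega)]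

theorem all_getD_iff (r : List Bool) :
    (r.all (fun b => b) = true) ↔ ∀ w, w < r.length → r.getD w false = true := by
  rw [List.all_eq_true]
  constructor
  · intro h w hw
    rw [List.getD_eq_getElem _ _ hw]
    exact h _ (List.getElem_mem _)
  · intro h b hb
    rcases List.mem_iff_getElem.mp hb with ⟨w, hw, rfl⟩
    have := h w hw
    rwa [List.getD_eq_getElem _ _ hw] at this

-- the initial marking loop (A writes 1 into an int list, B writes true into a bool list)
theorem mark_fold {α : Type} (v d : α) :
    ∀ (outs : List Int) (init : List α), (∀ o ∈ outs, PySem.Raise.InRange init.length o) →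
    (outs.foldl (fun r o => PySem.List.pySetD r o v) init).length = init.length ∧
    ∀ w, w < init.length →
      (outs.foldl (fun r o => PySem.List.pySetD r o v) init).getD w d =
        if ∃ o ∈ outs, nu init.length o = w then v else init.getD w d := by
  intro outs
  induction outs with
  | nil => intro init _; simp
  | cons o os ih =>
    intro init h
    have ho : PySem.Raise.InRange init.length o := h o (by simp)
    have hnu : nu init.length o < init.length := nu_lt ho
    have hset : PySem.List.pySetD init o v = init.set (nu init.length o) v :=
      pySetD_nu init v ho
    have hlen : (init.set (nu init.length o) v).length = init.length := by simp
    have h' : ∀ o' ∈ os, PySem.Raise.InRange (init.set (nu init.length o) v).length o' := by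
      rw [hlen]; exact fun o' ho' => h o' (by simp [ho'])
    obtain ⟨L1, L2⟩ := ih (init.set (nu init.length o) v) h'
    rw [List.foldl_cons, hset]
    refine ⟨by rw [L1, hlen], ?_⟩
    intro w hw
    rw [L2 w (by rw [hlen]; exact hw), hlen]
    by_cases hos : ∃ o' ∈ os, nu init.length o' = w
    · have hcons : ∃ o' ∈ o :: os, nu init.length o' = w := by
        rcases hos with ⟨o', ho', hh⟩
        exact ⟨o', by simp [ho'], hh⟩
      rw [if_pos hos, if_pos hcons]
    · by_cases how : nu init.length o = w
      · have hcons : ∃ o' ∈ o :: os, nu init.length o' = w := ⟨o, by simp, how⟩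
        rw [if_neg hos, if_pos hcons, ← how, getD_set_self' _ _ _ _ hnu]
      · have hcons : ¬ ∃ o' ∈ o :: os, nu init.length o' = w := by
          rintro ⟨o', ho', hh⟩
          rcases List.mem_cons.mp ho' with rfl | hmem
          · exact how hh
          · exact hos ⟨o', hmem, hh⟩
        rw [if_neg hos, if_neg hcons, getD_set_ne' _ _ _ (fun hc => how hc.symm)]

-- revert_graph: inner loop (append label i into slot nu x for every x in xs)
theorem inner_rev (n : Nat) (i : Int) :
    ∀ (xs : List Int), (∀ x ∈ xs, PySem.Raise.InRange n x) →
    ∀ (g : List (List Int)), g.length = n →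
    ((xs.foldl (fun g number =>
        PySem.List.pySetD g number (PySem.List.pyGetD g number [] ++ [i])) g).length = n ∧
     ∀ w, w < n → ∀ u : Int,
       (u ∈ (xs.foldl (fun g number =>
          PySem.List.pySetD g number (PySem.List.pyGetD g number [] ++ [i])) g).getD w []) ↔
        (u ∈ g.getD w [] ∨ (u = i ∧ ∃ x ∈ xs, nu n x = w))) := by
  intro xs
  induction xs with
  | nil => exact fun _ g hg => ⟨hg, fun w hw u => by simp⟩
  | cons x rest ih =>
    intro hxs g hg
    have hx : PySem.Raise.InRange n x := hxs x (by simp)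
    have hx' : PySem.Raise.InRange g.length x := by rw [hg]; exact hx
    have hnu : nu n x < n := nu_lt hx
    have hset : PySem.List.pySetD g x (PySem.List.pyGetD g x [] ++ [i]) =
        g.set (nu n x) (g.getD (nu n x) [] ++ [i]) := by
      rw [pySetD_nu g _ hx', pyGetD_nu g _ hx', hg]
    have hlen1 : (g.set (nu n x) (g.getD (nu n x) [] ++ [i])).length = n := by simp [hg]
    obtain ⟨L1, L2⟩ := ih (fun y hy => hxs y (by simp [hy])) _ hlen1
    rw [List.foldl_cons, hset]
    refine ⟨L1, ?_⟩
    intro w hw u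
    rw [L2 w hw u]
    by_cases hxw : nu n x = w
    · subst hxw
      rw [getD_set_self' _ _ _ _ (by omega)]
      simp only [List.mem_append, List.mem_singleton]
      constructor
      · rintro ((h | h) | h)
        · exact Or.inl h
        · exact Or.inr ⟨h, x, by simp, rfl⟩
        · rcases h with ⟨h1, y, hy, hh⟩
          exact Or.inr ⟨h1, y, by simp [hy], hh⟩
      · rintro (h | ⟨rfl, y, hy, hh⟩)
        · exact Or.inl (Or.inl h)
        · rcases List.mem_cons.mp hy with rfl | hy
          · exact Or.inl (Or.inr rfl)
          · exact Or.inr ⟨rfl, y, hy, hh⟩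
    · rw [getD_set_ne' _ _ _ (fun hc => hxw hc.symm)]
      constructor
      · rintro (h | ⟨rfl, y, hy, hh⟩)
        · exact Or.inl h
        · exact Or.inr ⟨rfl, y, by simp [hy], hh⟩
      · rintro (h | ⟨rfl, y, hy, hh⟩)
        · exact Or.inl h
        · rcases List.mem_cons.mp hy with rfl | hy
          · exact absurd hh hxw
          · exact Or.inr ⟨rfl, y, hy, hh⟩

theorem revert_fold (graph : List (List Int))
    (hpre : ∀ adj ∈ graph, ∀ x ∈ adj, PySem.Raise.InRange graph.length x) :
    ∀ m : Nat, m ≤ graph.length →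
    (((PySem.List.pyRange 0 (m : Int) 1).foldl (fun result i =>
        (PySem.List.pyGetD graph i []).foldl (fun result number =>
          PySem.List.pySetD result number (PySem.List.pyGetD result number [] ++ [i])) result)
        ((PySem.List.pyRange 0 (graph.length : Int) 1).map (fun _ => ([] : List Int)))).length
      = graph.length ∧
     ∀ w, w < graph.length → ∀ u : Int,
       (u ∈ ((PySem.List.pyRange 0 (m : Int) 1).foldl (fun result i =>
          (PySem.List.pyGetD graph i []).foldl (fun result number =>
            PySem.List.pySetD result number (PySem.List.pyGetD result number [] ++ [i])) result)
          ((PySem.List.pyRange 0 (graph.length : Int) 1).map (fun _ => ([] : List Int)))).getD w []) ↔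
       (∃ j : Nat, j < m ∧ u = (j : Int) ∧ ∃ x ∈ graph.getD j [], nu graph.length x = w)) := by
  have hinit_len : (((PySem.List.pyRange 0 (graph.length : Int) 1).map
      (fun _ => ([] : List Int)))).length = graph.length := by
    rw [List.length_map, PySem.List.length_pyRange_one]
    omega
  have hinit_getD : ∀ w, w < graph.length →
      (((PySem.List.pyRange 0 (graph.length : Int) 1).map
        (fun _ => ([] : List Int)))).getD w [] = [] := by
    intro w hw
    rw [List.getD_eq_getElem _ _ (by rw [hinit_len]; exact hw)]
    simp
  intro m
  induction m with
  | zero =>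
    intro _
    have hnil : PySem.List.pyRange 0 (((0:Nat) : Int)) 1 = [] :=
      PySem.List.pyRange_one_eq_nil (by simp)
    rw [hnil]
    simp only [List.foldl_nil]
    refine ⟨hinit_len, ?_⟩
    intro w hw u
    rw [hinit_getD w hw]
    simp
  | succ m ih =>
    intro hm
    obtain ⟨L1, L2⟩ := ih (by omega)
    have hsplit : PySem.List.pyRange 0 ((m+1 : Nat) : Int) 1 =
        PySem.List.pyRange 0 (m : Int) 1 ++ [(m : Int)] := by
      push_cast
      exact PySem.List.pyRange_one_succ_right (by omega)
    rw [hsplit, List.foldl_append, List.foldl_cons, List.foldl_nil]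
    have hget : PySem.List.pyGetD graph (m : Int) [] = graph.getD m [] := by
      simp
    have hmem_graph : graph.getD m [] ∈ graph := by
      rw [List.getD_eq_getElem _ _ (by omega)]
      exact List.getElem_mem _
    have hxs : ∀ x ∈ graph.getD m [], PySem.Raise.InRange graph.length x :=
      fun x hx => hpre _ hmem_graph x hx
    rw [hget]
    obtain ⟨I1, I2⟩ := inner_rev graph.length (m : Int) (graph.getD m []) hxs _ L1
    refine ⟨I1, ?_⟩
    intro w hw u
    rw [I2 w hw u, L2 w hw u]
    constructor
    · rintro (⟨j, hj, rfl, hx⟩ | ⟨rfl, hx⟩)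
      · exact ⟨j, by omega, rfl, hx⟩
      · exact ⟨m, by omega, rfl, hx⟩
    · rintro ⟨j, hj, rfl, hx⟩
      by_cases hjm : j = m
      · subst hjm; exact Or.inr ⟨rfl, hx⟩
      · exact Or.inl ⟨j, by omega, rfl, hx⟩

theorem revert_char (graph : List (List Int))
    (hpre : ∀ adj ∈ graph, ∀ x ∈ adj, PySem.Raise.InRange graph.length x) :
    (revert_graph graph).length = graph.length ∧
    ∀ w, w < graph.length → ∀ u : Int,
      (u ∈ (revert_graph graph).getD w []) ↔
      (∃ j : Nat, j < graph.length ∧ u = (j : Int) ∧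
        ∃ x ∈ graph.getD j [], nu graph.length x = w) := by
  have h := revert_fold graph hpre graph.length (le_refl _)
  unfold revert_graph
  simpa [PySem.List.len_eq] using h

-- one full pass of B, as a fold over any list of in-range vertices
theorem pass_fold (graph : List (List Int)) (outputs : List Int)
    (hpre : ∀ adj ∈ graph, ∀ x ∈ adj, PySem.Raise.InRange graph.length x) :
    ∀ (us : List Nat), (∀ u ∈ us, u < graph.length) →
    ∀ (r : List Bool) (c : Bool), r.length = graph.length →
    ∀ st, st = us.foldl (fun (rc : List Bool × Bool) u =>
        if (!(rc.1.getD u false) && (graph.getD u []).any (fun v => PySem.List.pyGetD rc.1 v false))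
        then (rc.1.set u true, true) else rc) (r, c) →
    (st.1.length = graph.length ∧
     (∀ w, r.getD w false = true → st.1.getD w false = true) ∧
     ((∀ w, w < graph.length → r.getD w false = true → ReachesOut graph outputs w) →
        ∀ w, w < graph.length → st.1.getD w false = true → ReachesOut graph outputs w) ∧
     (c = true → st.2 = true) ∧
     (st.2 = false →
        c = false ∧ st.1 = r ∧
        ∀ u ∈ us, r.getD u false = true ∨
          (graph.getD u []).any (fun v => PySem.List.pyGetD r v false) = false) ∧
     (st.1.count false ≤ r.count false) ∧
     (st.2 = true → c = true ∨ st.1.count false < r.count false)) := by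
  intro us
  induction us with
  | nil =>
    rintro _ r c hr st rfl
    exact ⟨hr, fun w h => h, fun h => h, fun h => h, fun h => ⟨h, rfl, by simp⟩,
      le_refl _, fun h => Or.inl h⟩
  | cons u us ih =>
    rintro hus r c hr st hst
    have hu : u < graph.length := hus u (by simp)
    have hul : u < r.length := by omega
    rw [List.foldl_cons] at hst
    by_cases hg : (!(r.getD u false) && (graph.getD u []).any
        (fun v => PySem.List.pyGetD r v false)) = true
    · rw [if_pos hg] at hst
      obtain ⟨hru, hany⟩ : r.getD u false = false ∧
          (graph.getD u []).any (fun v => PySem.List.pyGetD r v false) = true := by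
        simpa using hg
      have hr' : (r.set u true).length = graph.length := by simpa using hr
      obtain ⟨C1, C2, C3, C4, C5, C6, C7⟩ :=
        ih (fun x hx => hus x (by simp [hx])) (r.set u true) true hr' st hst
      have hcount : (r.set u true).count false + 1 = r.count false :=
        count_set_add_one hul (by rw [List.getD_eq_getElem _ _ hul] at hru; exact hru) rfl
      refine ⟨C1, ?_, ?_, fun _ => C4 rfl, ?_, by omega, fun _ => ?_⟩
      · intro w hw
        apply C2
        by_cases hwu : w = u
        · subst hwu; rw [getD_set_self' _ _ _ _ hul]
        · rwa [getD_set_ne' _ _ _ hwu]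
      · intro hsound
        apply C3
        intro w hw hw'
        by_cases hwu : w = u
        · subst hwu
          rcases List.any_eq_true.mp hany with ⟨v, hv, hvt⟩
          have hmemg : graph.getD w [] ∈ graph := by
            rw [List.getD_eq_getElem _ _ (by omega)]
            exact List.getElem_mem _
          have hvr : PySem.Raise.InRange r.length v := by
            rw [hr]; exact hpre _ hmemg v hv
          rw [pyGetD_nu r false hvr, hr] at hvt
          exact ReachesOut.step w v hw hv (hsound _ (nu_lt (by rw [← hr]; exact hvr)) hvt)
        · rw [getD_set_ne' _ _ _ hwu] at hw'
          exact hsound w hw hw'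
      · intro h2
        exact absurd (C4 rfl) (by rw [h2]; simp)
      · exact Or.inr (by omega)
    · rw [if_neg hg] at hst
      obtain ⟨C1, C2, C3, C4, C5, C6, C7⟩ :=
        ih (fun x hx => hus x (by simp [hx])) r c hr st hst
      refine ⟨C1, C2, C3, C4, ?_, C6, C7⟩
      intro h2
      obtain ⟨hc, hs, hrest⟩ := C5 h2
      refine ⟨hc, hs, ?_⟩
      intro u' hu'
      rcases List.mem_cons.mp hu' with rfl | hmem
      · rcases Bool.and_eq_false_iff.mp (Bool.not_eq_true _ ▸ hg) with h | h
        · left; simpa using h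
        · right; exact h
      · exact hrest u' hmem

theorem fixB_master (graph : List (List Int)) (outputs : List Int)
    (hpre : ∀ adj ∈ graph, ∀ x ∈ adj, PySem.Raise.InRange graph.length x) :
    ∀ (fuel : Nat) (r : List Bool), r.length = graph.length →
      r.count false < fuel →
      (∀ w, w < graph.length → r.getD w false = true → ReachesOut graph outputs w) →
      (∀ o ∈ outputs, r.getD (nu graph.length o) false = true) →
      ((fixLoopB graph fuel r).length = graph.length ∧
       (∀ w, w < graph.length → (fixLoopB graph fuel r).getD w false = true →
          ReachesOut graph outputs w) ∧
       (∀ o ∈ outputs, (fixLoopB graph fuel r).getD (nu graph.length o) false = true) ∧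
       (∀ u, u < graph.length →
          (∃ v ∈ graph.getD u [], (fixLoopB graph fuel r).getD (nu graph.length v) false = true) →
          (fixLoopB graph fuel r).getD u false = true)) := by
  intro fuel
  induction fuel with
  | zero => intro r _ hc; omega
  | succ f ih =>
    intro r hr hc hsound houts
    obtain ⟨C1, C2, C3, C4, C5, C6, C7⟩ :=
      pass_fold graph outputs hpre (List.range graph.length)
        (fun u hu => List.mem_range.mp hu) r false hr
        (propagate_pass graph r) (by unfold propagate_pass; rfl)
    rw [show fixLoopB graph (f+1) r =
        (if (propagate_pass graph r).2 then fixLoopB graph f (propagate_pass graph r).1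
         else (propagate_pass graph r).1) from rfl]
    by_cases hch : (propagate_pass graph r).2 = true
    · rw [if_pos hch]
      have hlt : (propagate_pass graph r).1.count false < r.count false := by
        rcases C7 hch with h | h
        · exact absurd h (by simp)
        · exact h
      exact ih (propagate_pass graph r).1 C1 (by omega) (C3 hsound)
        (fun o ho => C2 _ (houts o ho))
    · rw [if_neg hch]
      obtain ⟨_, hfix, hclosed⟩ := C5 (by simpa using hch)
      rw [hfix]
      refine ⟨hr, hsound, houts, ?_⟩
      intro u hu ⟨v, hv, hvt⟩
      rcases hclosed u (List.mem_range.mpr hu) with h | h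
      · exact h
      · exfalso
        have hmemg : graph.getD u [] ∈ graph := by
          rw [List.getD_eq_getElem _ _ (by omega)]
          exact List.getElem_mem _
        have hvr : PySem.Raise.InRange r.length v := by
          rw [hr]; exact hpre _ hmemg v hv
        have := List.any_eq_false.mp h v hv
        rw [pyGetD_nu r false hvr, hr] at this
        exact this hvt

theorem completeB (graph : List (List Int)) (outputs : List Int) (r : List Bool)
    (hclosed : ∀ u, u < graph.length →
        (∃ v ∈ graph.getD u [], r.getD (nu graph.length v) false = true) →
        r.getD u false = true)
    (houts : ∀ o ∈ outputs, r.getD (nu graph.length o) false = true) :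
    ∀ u, ReachesOut graph outputs u → r.getD u false = true := by
  intro u h
  induction h with
  | base o ho => exact houts o ho
  | step u x hu hx _ ih => exact hclosed u hu ⟨x, hx, ih⟩

theorem alt_true_iff (graph : List (List Int)) (outputs : List Int)
    (hpre : ∀ adj ∈ graph, ∀ x ∈ adj, PySem.Raise.InRange graph.length x)
    (houts : ∀ o ∈ outputs, PySem.Raise.InRange graph.length o) :
    (all_reach_outputs_alt graph outputs = true) ↔
      (∀ w, w < graph.length → ReachesOut graph outputs w) := by
  have hrep : (List.replicate graph.length (false : Bool)).length = graph.length := by simp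
  obtain ⟨M1, M2⟩ := mark_fold true false outputs (List.replicate graph.length false)
    (by rw [hrep]; exact houts)
  set r0 := outputs.foldl (fun r o => PySem.List.pySetD r o true)
    (List.replicate graph.length false) with hr0
  rw [hrep] at M1 M2
  have hmk : ∀ w, w < graph.length →
      (r0.getD w false = true ↔ ∃ o ∈ outputs, nu graph.length o = w) := by
    intro w hw
    rw [M2 w hw]
    by_cases h : ∃ o ∈ outputs, nu graph.length o = w
    · simp [h]
    · simp [h]
  have hsound : ∀ w, w < graph.length → r0.getD w false = true →
      ReachesOut graph outputs w := by
    intro w hw hmark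
    rcases (hmk w hw).mp hmark with ⟨o, ho, rfl⟩
    exact ReachesOut.base o ho
  have houts0 : ∀ o ∈ outputs, r0.getD (nu graph.length o) false = true := by
    intro o ho
    exact (hmk _ (nu_lt (houts o ho))).mpr ⟨o, ho, rfl⟩
  have hcnt : r0.count false < graph.length + 1 := by
    have := List.count_le_length (l := r0) (a := false)
    omega
  obtain ⟨F1, F2, F3, F4⟩ := fixB_master graph outputs hpre (graph.length + 1) r0 M1 hcnt hsound houts0
  show ((fixLoopB graph (graph.length + 1) r0).all (fun b => b) = true) ↔
      (∀ w, w < graph.length → ReachesOut graph outputs w)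
  rw [all_getD_iff, F1]
  constructor
  · intro h w hw
    exact F2 w hw (h w hw)
  · intro h w hw
    exact completeB graph outputs _ F4 F3 w (h w hw)

-- ===== A-side =====
def mkAt (v : List Int) (w : Nat) : Prop := v.getD w 0 ≠ 0

theorem bfsLoopA_nil (g : List (List Int)) (fuel : Nat) (visited : List Int)
    (result : PySem.Set Int) : bfsLoopA g fuel [] visited result = result := by
  cases fuel <;> rfl

theorem bfsLoopA_cons (g : List (List Int)) (fuel : Nat) (q0 : Int) (qs : List Int)
    (visited : List Int) (result : PySem.Set Int) :
    bfsLoopA g (fuel+1) (q0::qs) visited result =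
      bfsLoopA g fuel
        (((PySem.List.pyGetD g ((q0 :: qs).getLast (List.cons_ne_nil q0 qs)) []).foldl
          (fun (qv : List Int × List Int) nb =>
            if PySem.List.pyGetD qv.2 nb 0 == 0 then (qv.1 ++ [nb], PySem.List.pySetD qv.2 nb 1)
            else qv) ((q0 :: qs).dropLast, visited)).1)
        (((PySem.List.pyGetD g ((q0 :: qs).getLast (List.cons_ne_nil q0 qs)) []).foldl
          (fun (qv : List Int × List Int) nb =>
            if PySem.List.pyGetD qv.2 nb 0 == 0 then (qv.1 ++ [nb], PySem.List.pySetD qv.2 nb 1)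
            else qv) ((q0 :: qs).dropLast, visited)).2)
        (PySem.Set.add result ((q0 :: qs).getLast (List.cons_ne_nil q0 qs))) := rfl

-- the neighbour loop of one BFS step, over any list of in-range non-negative labels
theorem bfs_inner (n : Nat) :
    ∀ (xs : List Int), (∀ x ∈ xs, ∃ j : Nat, j < n ∧ x = (j : Int)) →
    ∀ (q v : List Int), v.length = n →
    ∀ st, st = xs.foldl (fun (qv : List Int × List Int) nb =>
        if PySem.List.pyGetD qv.2 nb 0 == 0 then (qv.1 ++ [nb], PySem.List.pySetD qv.2 nb 1)
        else qv) (q, v) →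
    (st.2.length = n ∧
     (∀ w, mkAt v w → mkAt st.2 w) ∧
     (∀ x ∈ st.1, x ∈ q ∨ x ∈ xs) ∧
     (∀ nb ∈ xs, mkAt st.2 (nu n nb)) ∧
     (∀ (P : Nat → Prop), (∀ w, w < n → (mkAt v w ↔ (∃ x ∈ q, nu n x = w) ∨ P w)) →
        ∀ w, w < n → (mkAt st.2 w ↔ (∃ x ∈ st.1, nu n x = w) ∨ P w)) ∧
     (∀ (L : List Int),
        (∀ w, w < n → (mkAt v w ↔ (∃ x ∈ q, nu n x = w) ∨ (∃ x ∈ L, nu n x = w))) →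
        (∀ x ∈ q ++ L, ∀ y ∈ q ++ L, nu n x = nu n y → x = y) →
        (∀ x ∈ st.1 ++ L, ∀ y ∈ st.1 ++ L, nu n x = nu n y → x = y)) ∧
     (st.2.count 0 + st.1.length = v.count 0 + q.length)) := by
  intro xs
  induction xs with
  | nil =>
    rintro _ q v hv st rfl
    exact ⟨hv, fun _ h => h, fun x hx => Or.inl hx, by simp, fun P h => h,
      fun L h hinj => hinj, rfl⟩
  | cons nb xs ih =>
    rintro hxs q v hv st hst
    obtain ⟨j, hj, rfl⟩ := hxs nb (by simp)
    have hjl : j < v.length := by omega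
    rw [List.foldl_cons] at hst
    have hnu : nu n (j : Int) = j := nu_natCast hj
    by_cases hg : (PySem.List.pyGetD v (j : Int) 0 == 0) = true
    · have hv0 : v.getD j 0 = 0 := by
        rw [beq_iff_eq] at hg
        rwa [PySem.List.pyGetD_natCast] at hg
      rw [if_pos hg, PySem.List.pySetD_natCast] at hst
      have hvj : v[j] = 0 := by rwa [List.getD_eq_getElem _ _ hjl] at hv0
      have hlen' : (v.set j (1 : Int)).length = n := by simpa using hv
      obtain ⟨C1, C2, C3, C4, C5, C6, C7⟩ :=
        ih (fun x hx => hxs x (by simp [hx])) (q ++ [(j : Int)]) (v.set j 1) hlen' st hst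
      have hmkset : ∀ w, mkAt (v.set j 1) w ↔ (w = j ∨ mkAt v w) := by
        intro w
        by_cases hwj : w = j
        · subst hwj
          unfold mkAt
          rw [getD_set_self' _ _ _ _ hjl]
          simp
        · unfold mkAt
          rw [getD_set_ne' _ _ _ hwj]
          simp [hwj]
      have hnewmk : ∀ (P : Nat → Prop),
          (∀ w, w < n → (mkAt v w ↔ (∃ x ∈ q, nu n x = w) ∨ P w)) →
          ∀ w, w < n → (mkAt (v.set j 1) w ↔ (∃ x ∈ q ++ [(j : Int)], nu n x = w) ∨ P w) := by
        intro P hP w hw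
        rw [hmkset w, hP w hw]
        simp only [List.mem_append, List.mem_singleton]
        constructor
        · rintro (hwj | (⟨x, hx, hh⟩ | hp))
          · exact Or.inl ⟨(j : Int), Or.inr rfl, by rw [hnu, hwj]⟩
          · exact Or.inl ⟨x, Or.inl hx, hh⟩
          · exact Or.inr hp
        · rintro (⟨x, hx | rfl, hh⟩ | hp)
          · exact Or.inr (Or.inl ⟨x, hx, hh⟩)
          · exact Or.inl (by rw [← hh, hnu])
          · exact Or.inr (Or.inr hp)
      refine ⟨C1, ?_, ?_, ?_, ?_, ?_, ?_⟩
      · intro w hw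
        exact C2 w ((hmkset w).mpr (Or.inr hw))
      · intro x hx
        rcases C3 x hx with h | h
        · rcases List.mem_append.mp h with h | h
          · exact Or.inl h
          · have hxj : x = (j : Int) := by simpa using h
            exact Or.inr (by simp [hxj])
        · exact Or.inr (by simp [h])
      · intro nb' hnb'
        rcases List.mem_cons.mp hnb' with rfl | hmem
        · rw [hnu]
          exact C2 j ((hmkset j).mpr (Or.inl rfl))
        · exact C4 nb' hmem
      · intro P hP
        exact C5 P (hnewmk P hP)
      · intro L hMk hinj
        refine C6 L (hnewmk _ hMk) ?_
        intro x hx y hy hxy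
        have hnotmk : ¬ mkAt v j := by
          unfold mkAt
          rw [hv0]
          simp
        have hnew : ∀ z, z ∈ (q ++ [(j : Int)]) ++ L → z = (j : Int) ∨ z ∈ q ++ L := by
          intro z hz
          rcases List.mem_append.mp hz with hz | hz
          · rcases List.mem_append.mp hz with hz | hz
            · exact Or.inr (List.mem_append.mpr (Or.inl hz))
            · exact Or.inl (by simpa using hz)
          · exact Or.inr (List.mem_append.mpr (Or.inr hz))
        have hnomatch : ∀ z, z ∈ q ++ L → nu n z ≠ j := by
          intro z hz hzj
          apply hnotmk
          rcases List.mem_append.mp hz with hz | hz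
          · exact ((hMk j hj).mpr (Or.inl ⟨z, hz, hzj⟩))
          · exact ((hMk j hj).mpr (Or.inr ⟨z, hz, hzj⟩))
        rcases hnew x hx with rfl | hx'
        · rcases hnew y hy with rfl | hy'
          · rfl
          · exact absurd (by rw [← hxy, hnu]) (hnomatch y hy')
        · rcases hnew y hy with rfl | hy'
          · exact absurd (by rw [hxy, hnu]) (hnomatch x hx')
          · exact hinj x hx' y hy' hxy
      · have hcnt : (v.set j (1 : Int)).count 0 + 1 = v.count 0 :=
          count_set_add_one hjl hvj rfl
        rw [C7]
        simp only [List.length_append, List.length_singleton]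
        omega
    · rw [if_neg hg] at hst
      obtain ⟨C1, C2, C3, C4, C5, C6, C7⟩ :=
        ih (fun x hx => hxs x (by simp [hx])) q v hv st hst
      have hmk : mkAt v j := by
        unfold mkAt
        intro h
        apply hg
        rw [beq_iff_eq, PySem.List.pyGetD_natCast]
        exact h
      refine ⟨C1, C2, ?_, ?_, C5, C6, C7⟩
      · intro x hx
        rcases C3 x hx with h | h
        · exact Or.inl h
        · exact Or.inr (by simp [h])
      · intro nb' hnb'
        rcases List.mem_cons.mp hnb' with rfl | hmem
        · rw [hnu]
          exact C2 j hmk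
        · exact C4 nb' hmem

theorem bfsA_master (graph : List (List Int)) (outputs : List Int) (g : List (List Int))
    (hglen : g.length = graph.length)
    (hgelem : ∀ w, w < graph.length → ∀ u ∈ g.getD w [],
        ∃ j : Nat, j < graph.length ∧ u = (j : Int))
    (hgmem : ∀ w, w < graph.length → ∀ u : Int, (u ∈ g.getD w []) ↔
        (∃ j : Nat, j < graph.length ∧ u = (j : Int) ∧
          ∃ x ∈ graph.getD j [], nu graph.length x = w)) :
    ∀ (fuel : Nat) (queue visited : List Int) (result : PySem.Set Int),
    visited.length = graph.length →
    (∀ x ∈ queue, PySem.Raise.InRange graph.length x) →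
    (∀ x ∈ result, PySem.Raise.InRange graph.length x) →
    (∀ w, w < graph.length → (mkAt visited w ↔ (∃ x ∈ queue, nu graph.length x = w) ∨
        (∃ x ∈ result, nu graph.length x = w))) →
    (∀ w, w < graph.length → mkAt visited w → ReachesOut graph outputs w) →
    (∀ s ∈ result, ∀ u ∈ g.getD (nu graph.length s) [], mkAt visited (nu graph.length u)) →
    (∀ x ∈ queue ++ result, ∀ y ∈ queue ++ result,
        nu graph.length x = nu graph.length y → x = y) →
    result.Nodup →
    visited.count 0 + queue.length ≤ fuel →
    ((bfsLoopA g fuel queue visited result).Nodup ∧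
     (∀ x ∈ bfsLoopA g fuel queue visited result,
        PySem.Raise.InRange graph.length x ∧ ReachesOut graph outputs (nu graph.length x)) ∧
     (∀ x ∈ bfsLoopA g fuel queue visited result, ∀ y ∈ bfsLoopA g fuel queue visited result,
        nu graph.length x = nu graph.length y → x = y) ∧
     (∀ w, w < graph.length → mkAt visited w →
        ∃ x ∈ bfsLoopA g fuel queue visited result, nu graph.length x = w) ∧
     (∀ s ∈ bfsLoopA g fuel queue visited result, ∀ u ∈ g.getD (nu graph.length s) [],
        ∃ x ∈ bfsLoopA g fuel queue visited result, nu graph.length x = nu graph.length u)) := by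
  intro fuel
  induction fuel with
  | zero =>
    intro queue visited result hV hQ hR hMk hSound hProc hInj hNd hmu
    cases queue with
    | nil =>
      rw [bfsLoopA_nil]
      refine ⟨hNd, ?_, ?_, ?_, ?_⟩
      · intro x hx
        refine ⟨hR x hx, ?_⟩
        exact hSound _ (nu_lt (hR x hx)) ((hMk _ (nu_lt (hR x hx))).mpr (Or.inr ⟨x, hx, rfl⟩))
      · intro x hx y hy
        exact hInj x (by simpa using hx) y (by simpa using hy)
      · intro w hw hm
        rcases (hMk w hw).mp hm with ⟨x, hx, _⟩ | h
        · exact absurd hx (List.not_mem_nil)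
        · exact h
      · intro s hs u hu
        obtain ⟨j, hj, rfl⟩ := hgelem _ (nu_lt (hR s hs)) u hu
        rw [nu_natCast hj]
        have hm : mkAt visited j := by
          have := hProc s hs _ hu
          rwa [nu_natCast hj] at this
        rcases (hMk j hj).mp hm with ⟨x, hx, _⟩ | h
        · exact absurd hx (List.not_mem_nil)
        · exact h
    | cons q0 qs =>
      exfalso
      have : (q0 :: qs).length = qs.length + 1 := rfl
      omega
  | succ fuel ih =>
    intro queue visited result hV hQ hR hMk hSound hProc hInj hNd hmu
    cases queue with
    | nil =>
      rw [bfsLoopA_nil]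
      refine ⟨hNd, ?_, ?_, ?_, ?_⟩
      · intro x hx
        refine ⟨hR x hx, ?_⟩
        exact hSound _ (nu_lt (hR x hx)) ((hMk _ (nu_lt (hR x hx))).mpr (Or.inr ⟨x, hx, rfl⟩))
      · intro x hx y hy
        exact hInj x (by simpa using hx) y (by simpa using hy)
      · intro w hw hm
        rcases (hMk w hw).mp hm with ⟨x, hx, _⟩ | h
        · exact absurd hx (List.not_mem_nil)
        · exact h
      · intro s hs u hu
        obtain ⟨j, hj, rfl⟩ := hgelem _ (nu_lt (hR s hs)) u hu
        rw [nu_natCast hj]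
        have hm : mkAt visited j := by
          have := hProc s hs _ hu
          rwa [nu_natCast hj] at this
        rcases (hMk j hj).mp hm with ⟨x, hx, _⟩ | h
        · exact absurd hx (List.not_mem_nil)
        · exact h
    | cons q0 qs =>
      rw [bfsLoopA_cons]
      set s := (q0 :: qs).getLast (List.cons_ne_nil q0 qs) with hs_def
      have hq : (q0 :: qs).dropLast ++ [s] = q0 :: qs := List.dropLast_append_getLast _
      have hs_mem : s ∈ q0 :: qs := List.getLast_mem _
      have hsIn : PySem.Raise.InRange graph.length s := hQ s hs_mem
      have hnus : nu graph.length s < graph.length := nu_lt hsIn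
      have hgs : PySem.List.pyGetD g s [] = g.getD (nu graph.length s) [] := by
        have := pyGetD_nu g (i := s) [] (by rw [hglen]; exact hsIn)
        rwa [hglen] at this
      have hxs : ∀ x ∈ PySem.List.pyGetD g s [], ∃ j : Nat, j < graph.length ∧ x = (j : Int) := by
        rw [hgs]; exact hgelem _ hnus
      obtain ⟨I1, I2, I3, I4, I5, I6, I7⟩ :=
        bfs_inner graph.length (PySem.List.pyGetD g s []) hxs ((q0 :: qs).dropLast) visited hV
          _ rfl
      have hmemxs : ∀ x ∈ PySem.List.pyGetD g s [], x ∈ g.getD (nu graph.length s) [] := by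
        rw [hgs]; exact fun x hx => hx
      -- marked vertex of a queue label is ReachesOut
      have hROq : ∀ x ∈ q0 :: qs, ReachesOut graph outputs (nu graph.length x) := by
        intro x hx
        exact hSound _ (nu_lt (hQ x hx)) ((hMk _ (nu_lt (hQ x hx))).mpr (Or.inl ⟨x, hx, rfl⟩))
      have hROxs : ∀ x ∈ PySem.List.pyGetD g s [],
          ReachesOut graph outputs (nu graph.length x) := by
        intro x hx
        obtain ⟨j, hj, hxe⟩ := hxs x hx
        rw [hxe, nu_natCast hj]
        obtain ⟨j', hj', hcast, x', hx', hnux'⟩ := (hgmem _ hnus x).mp (hmemxs x hx)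
        have hjj : j = j' := by
          rw [hxe] at hcast
          exact_mod_cast hcast
        subst hjj
        exact ReachesOut.step j x' hj hx' (by rw [hnux']; exact hROq s hs_mem)
      have hMkhyp : ∀ w, w < graph.length → (mkAt visited w ↔
          (∃ x ∈ (q0 :: qs).dropLast, nu graph.length x = w) ∨
          (∃ x ∈ PySem.Set.add result s, nu graph.length x = w)) := by
        intro w hw
        rw [hMk w hw]
        constructor
        · rintro (⟨x, hx, hh⟩ | ⟨x, hx, hh⟩)
          · rw [← hq] at hx
            rcases List.mem_append.mp hx with hx | hx
            · exact Or.inl ⟨x, hx, hh⟩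
            · exact Or.inr ⟨x, by rw [PySem.Set.mem_add _ _ _]; exact Or.inr (by simpa using hx), hh⟩
          · exact Or.inr ⟨x, by rw [PySem.Set.mem_add _ _ _]; exact Or.inl hx, hh⟩
        · rintro (⟨x, hx, hh⟩ | ⟨x, hx, hh⟩)
          · exact Or.inl ⟨x, by rw [← hq]; exact List.mem_append.mpr (Or.inl hx), hh⟩
          · rcases (PySem.Set.mem_add _ _ _).mp hx with hx | rfl
            · exact Or.inr ⟨x, hx, hh⟩
            · exact Or.inl ⟨s, hs_mem, hh⟩
      set st := ((PySem.List.pyGetD g s []).foldl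
          (fun (qv : List Int × List Int) nb =>
            if PySem.List.pyGetD qv.2 nb 0 == 0 then (qv.1 ++ [nb], PySem.List.pySetD qv.2 nb 1)
            else qv) ((q0 :: qs).dropLast, visited)) with hst_def
      have nMk : ∀ w, w < graph.length → (mkAt st.2 w ↔
          (∃ x ∈ st.1, nu graph.length x = w) ∨
          (∃ x ∈ PySem.Set.add result s, nu graph.length x = w)) :=
        I5 _ hMkhyp
      have nQ : ∀ x ∈ st.1, PySem.Raise.InRange graph.length x := by
        intro x hx
        rcases I3 x hx with hx' | hx'
        · exact hQ x ((List.dropLast_sublist (q0 :: qs)).subset hx')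
        · obtain ⟨j, hj, rfl⟩ := hxs x hx'
          exact inRange_natCast hj
      have nR : ∀ x ∈ PySem.Set.add result s, PySem.Raise.InRange graph.length x := by
        intro x hx
        rcases (PySem.Set.mem_add _ _ _).mp hx with hx | rfl
        · exact hR x hx
        · exact hsIn
      have nSound : ∀ w, w < graph.length → mkAt st.2 w → ReachesOut graph outputs w := by
        intro w hw hm
        rcases (nMk w hw).mp hm with ⟨x, hx, rfl⟩ | ⟨x, hx, rfl⟩
        · rcases I3 x hx with hx' | hx'
          · exact hROq x ((List.dropLast_sublist (q0 :: qs)).subset hx')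
          · exact hROxs x hx'
        · rcases (PySem.Set.mem_add _ _ _).mp hx with hx' | rfl
          · exact hSound _ (nu_lt (hR x hx'))
              ((hMk _ (nu_lt (hR x hx'))).mpr (Or.inr ⟨x, hx', rfl⟩))
          · exact hROq s hs_mem
      have nProc : ∀ s' ∈ PySem.Set.add result s,
          ∀ u ∈ g.getD (nu graph.length s') [], mkAt st.2 (nu graph.length u) := by
        intro s' hs' u hu
        rcases (PySem.Set.mem_add _ _ _).mp hs' with hs' | rfl
        · exact I2 _ (hProc s' hs' u hu)
        · exact I4 u (by rw [hgs]; exact hu)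
      have nInj : ∀ x ∈ st.1 ++ PySem.Set.add result s, ∀ y ∈ st.1 ++ PySem.Set.add result s,
          nu graph.length x = nu graph.length y → x = y := by
        apply I6 _ hMkhyp
        intro x hx y hy hxy
        have hmm : ∀ z, z ∈ (q0 :: qs).dropLast ++ PySem.Set.add result s →
            z ∈ (q0 :: qs) ++ result := by
          intro z hz
          rcases List.mem_append.mp hz with hz | hz
          · exact List.mem_append.mpr (Or.inl ((List.dropLast_sublist (q0 :: qs)).subset hz))
          · rcases (PySem.Set.mem_add _ _ _).mp hz with hz | rfl
            · exact List.mem_append.mpr (Or.inr hz)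
            · exact List.mem_append.mpr (Or.inl hs_mem)
        exact hInj x (hmm x hx) y (hmm y hy) hxy
      have nNd : (PySem.Set.add result s).Nodup := PySem.Set.nodup_add _ _ hNd
      have nmu : st.2.count 0 + st.1.length ≤ fuel := by
        have hdl : (q0 :: qs).dropLast.length + 1 = (q0 :: qs).length := by
          have h1 : (q0 :: qs).length = qs.length + 1 := rfl
          simp [List.length_dropLast]
        rw [I7]
        omega
      obtain ⟨C1, C2, C3, C4, C5⟩ :=
        ih st.1 st.2 (PySem.Set.add result s) I1 nQ nR nMk nSound nProc nInj nNd nmu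
      refine ⟨C1, C2, C3, ?_, C5⟩
      intro w hw hm
      exact C4 w hw (I2 w hm)

theorem reach_represented (graph : List (List Int)) (outputs : List Int) (g : List (List Int))
    (hpre1 : ∀ adj ∈ graph, ∀ x ∈ adj, PySem.Raise.InRange graph.length x)
    (hgmem : ∀ w, w < graph.length → ∀ u : Int, (u ∈ g.getD w []) ↔
        (∃ j : Nat, j < graph.length ∧ u = (j : Int) ∧
          ∃ x ∈ graph.getD j [], nu graph.length x = w))
    (res : List Int)
    (hbase : ∀ o ∈ outputs, ∃ x ∈ res, nu graph.length x = nu graph.length o)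
    (hclos : ∀ s ∈ res, ∀ u ∈ g.getD (nu graph.length s) [],
        ∃ x ∈ res, nu graph.length x = nu graph.length u) :
    ∀ w, ReachesOut graph outputs w → ∃ x ∈ res, nu graph.length x = w := by
  intro w h
  induction h with
  | base o ho => exact hbase o ho
  | step u x hu hx _ ih =>
    obtain ⟨y, hy, hyx⟩ := ih
    have hmemg : graph.getD u [] ∈ graph := by
      rw [List.getD_eq_getElem _ _ (by omega)]
      exact List.getElem_mem _
    have hxr : PySem.Raise.InRange graph.length x := hpre1 _ hmemg x hx
    have hu_mem : (u : Int) ∈ g.getD (nu graph.length x) [] :=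
      (hgmem _ (nu_lt hxr) _).mpr ⟨u, hu, rfl, x, hx, rfl⟩
    rw [← hyx] at hu_mem
    obtain ⟨z, hz, hzz⟩ := hclos y hy _ hu_mem
    rw [nu_natCast hu] at hzz
    exact ⟨z, hz, hzz⟩

theorem a_true_iff (graph : List (List Int)) (outputs : List Int)
    (hpre1 : ∀ adj ∈ graph, ∀ x ∈ adj, PySem.Raise.InRange graph.length x)
    (hpre2 : ∀ o ∈ outputs, PySem.Raise.InRange graph.length o)
    (hinj0 : ∀ x ∈ outputs, ∀ y ∈ outputs,
        nu graph.length x = nu graph.length y → x = y) :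
    (all_reach_outputs graph outputs = true) ↔
      (∀ w, w < graph.length → ReachesOut graph outputs w) := by
  obtain ⟨hglen, hgmem'⟩ := revert_char graph hpre1
  set g := revert_graph graph with hg_def
  have hgmem : ∀ w, w < graph.length → ∀ u : Int, (u ∈ g.getD w []) ↔
      (∃ j : Nat, j < graph.length ∧ u = (j : Int) ∧
        ∃ x ∈ graph.getD j [], nu graph.length x = w) := hgmem'
  have hgelem : ∀ w, w < graph.length → ∀ u ∈ g.getD w [],
      ∃ j : Nat, j < graph.length ∧ u = (j : Int) := by
    intro w hw u hu
    obtain ⟨j, hj, rfl, _⟩ := (hgmem w hw u).mp hu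
    exact ⟨j, hj, rfl⟩
  have hrep_len : (List.replicate g.length (0 : Int)).length = graph.length := by
    simp [hglen]
  obtain ⟨M1, M2⟩ := mark_fold (1 : Int) (0 : Int) outputs (List.replicate g.length 0)
    (by rw [hrep_len]; exact hpre2)
  set visited0 := outputs.foldl (fun v index => PySem.List.pySetD v index 1)
    (List.replicate g.length (0 : Int)) with hv0_def
  rw [hrep_len] at M1 M2
  have hMk0 : ∀ w, w < graph.length →
      (mkAt visited0 w ↔ ∃ o ∈ outputs, nu graph.length o = w) := by
    intro w hw
    unfold mkAt
    rw [M2 w hw]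
    by_cases h : ∃ o ∈ outputs, nu graph.length o = w
    · simp [h]
    · simp only [h, if_false]
      rw [List.getD_eq_getElem _ _ (by rw [hrep_len]; omega)]
      simp
  have hmu0 : visited0.count 0 + outputs.length ≤ g.length + outputs.length + 1 := by
    have h1 := List.count_le_length (a := (0 : Int)) (l := visited0)
    have : visited0.length = graph.length := M1
    omega
  obtain ⟨C1, C2, C3, C4, C5⟩ :=
    bfsA_master graph outputs g hglen hgelem hgmem (g.length + outputs.length + 1)
      outputs visited0 PySem.Set.empty M1 hpre2 (by intro x hx; simp [PySem.Set.empty] at hx)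
      (by intro w hw
          rw [hMk0 w hw]
          constructor
          · exact fun h => Or.inl h
          · rintro (h | ⟨x, hx, _⟩)
            · exact h
            · simp [PySem.Set.empty] at hx)
      (by intro w hw hm
          obtain ⟨o, ho, rfl⟩ := (hMk0 w hw).mp hm
          exact ReachesOut.base o ho)
      (by intro s hs; simp [PySem.Set.empty] at hs)
      (by intro x hx y hy hxy
          have hx' : x ∈ outputs := by simpa [PySem.Set.empty] using hx
          have hy' : y ∈ outputs := by simpa [PySem.Set.empty] using hy
          exact hinj0 x hx' y hy' hxy)
      (by simp [PySem.Set.empty])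
      hmu0
  set res := bfsLoopA g (g.length + outputs.length + 1) outputs visited0 PySem.Set.empty
    with hres_def
  have hshow : all_reach_outputs graph outputs =
      (PySem.Set.len res == PySem.List.len g) := rfl
  rw [hshow]
  have hiff : (res.length = graph.length) ↔
      (∀ w, w < graph.length → ReachesOut graph outputs w) := by
    have hnodupM : (res.map (nu graph.length)).Nodup :=
      List.Nodup.map_on C3 C1
    have hsub : (res.map (nu graph.length)).toFinset ⊆ Finset.range graph.length := by
      intro m hm
      rw [List.mem_toFinset] at hm
      obtain ⟨x, hx, rfl⟩ := List.mem_map.mp hm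
      exact Finset.mem_range.mpr (nu_lt (C2 x hx).1)
    have hcard : (res.map (nu graph.length)).toFinset.card = res.length := by
      rw [List.toFinset_card_of_nodup hnodupM, List.length_map]
    constructor
    · intro hlen w hw
      have heq : (res.map (nu graph.length)).toFinset = Finset.range graph.length :=
        Finset.eq_of_subset_of_card_le hsub (by rw [hcard, hlen, Finset.card_range])
      have : w ∈ (res.map (nu graph.length)).toFinset := by
        rw [heq]; exact Finset.mem_range.mpr hw
      rw [List.mem_toFinset] at this
      obtain ⟨x, hx, rfl⟩ := List.mem_map.mp this
      exact (C2 x hx).2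
    · intro hall
      have hrep : ∀ w, w < graph.length → ∃ x ∈ res, nu graph.length x = w := by
        intro w hw
        refine reach_represented graph outputs g hpre1 hgmem res ?_ C5 w (hall w hw)
        intro o ho
        exact C4 _ (nu_lt (hpre2 o ho)) ((hMk0 _ (nu_lt (hpre2 o ho))).mpr ⟨o, ho, rfl⟩)
      have hsup : Finset.range graph.length ⊆ (res.map (nu graph.length)).toFinset := by
        intro m hm
        obtain ⟨x, hx, rfl⟩ := hrep m (Finset.mem_range.mp hm)
        rw [List.mem_toFinset]
        exact List.mem_map.mpr ⟨x, hx, rfl⟩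
      have heq : (res.map (nu graph.length)).toFinset = Finset.range graph.length :=
        Finset.Subset.antisymm hsub hsup
      rw [← hcard, heq, Finset.card_range]
  rw [beq_iff_eq]
  have hlen2 : (PySem.Set.len res = PySem.List.len g) ↔ (res.length = graph.length) := by
    simp [PySem.Set.len, PySem.List.len, hglen]
  rw [hlen2]
  exact hiff

-- ===== VERDICT (by name: the statement is the Claim_ definition above) =====
theorem all_reach_outputs_spec : Claim_unchanged_all_reach_outputs := by
  intro graph outputs _ hpre
  unfold Spec_all_reach_outputs
  intro hD
  obtain ⟨hpre1, hpre2⟩ := hpre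
  have hinj0 : ∀ x ∈ outputs, ∀ y ∈ outputs,
      nu graph.length x = nu graph.length y → x = y := by
    intro x hx y hy hxy
    by_contra hne
    apply hD
    refine ⟨x, hx, y, hy, hne, ?_⟩
    have hxr := hpre2 x hx
    have hyr := hpre2 y hy
    obtain ⟨hx1, hx2⟩ := hxr
    obtain ⟨hy1, hy2⟩ := hyr
    have hn : ((graph.length : Int)) ≠ 0 := by omega
    have e1 := Int.emod_nonneg x hn
    have e2 := Int.emod_nonneg y hn
    unfold nu at hxy
    omega
  have ha := a_true_iff graph outputs hpre1 hpre2 hinj0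
  have hb := alt_true_iff graph outputs hpre1 hpre2
  cases hA : all_reach_outputs graph outputs
  · cases hB : all_reach_outputs_alt graph outputs
    · rfl
    · exact absurd (ha.mpr (hb.mp hB)) (by simp [hA])
  · cases hB : all_reach_outputs_alt graph outputs
    · exact absurd (hb.mpr (ha.mp hA)) (by simp [hB])
    · rfl

theorem all_reach_outputs_changed : Claim_changed_all_reach_outputs := by
  unfold Claim_changed_all_reach_outputs; decide
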